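-- pv_equiv track=rewrite | github.com/rayglf/ccaes | check/CCAES.py | simulation_streamlog
-- ===== SOURCE A (Python) =====
-- def simulation_streamlog(data,k):
--     # 初始化分组列表和当前分组
--     grouped_data = []
--     current_group = []
--     # 上一个数字元素
--     previous_num = None
--     # 遍历数组并分组
--     for item in data:
--         current_num = item[0]
--         # 如果当前数字元素与上一个数字元素相同，或者当前分组为空（即开始新的分组）
--         if current_num == previous_num or not current_group:
--             current_group.append(item)
--         else:
--             # 如果当前数字元素不同，且当前分组已有五个不同的数字元素，则保存当前分组并开始新的分组
--             if len(set([x[0] for x in current_group])) == k: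
--                 grouped_data.append(current_group)
--                 current_group = [item]
--             else:
--                 # 如果当前分组中不同数字元素少于五个，继续添加到当前分组
--                 current_group.append(item)
--         previous_num = current_num
--     # 添加最后一个分组（如果有）
--     if current_group:
--         grouped_data.append(current_group)
--     return grouped_data
-- ===== SOURCE B (Python) =====
-- def simulation_streamlog(data, k):
--     # pass 1: split data into maximal runs of equal first-elements
--     runs = []
--     i = 0
--     n = len(data)
--     while i < n:
--         j = i + 1
--         while j < n and data[j][0] == data[i][0]:
--             j += 1
--         runs.append(data[i:j])
--         i = j
--     # pass 2: greedily merge consecutive runs into a group until it holds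
--     # exactly k distinct first-elements, then close the group
--     groups = []
--     i = 0
--     m = len(runs)
--     while i < m:
--         seen = {runs[i][0][0]}
--         group = list(runs[i])
--         i += 1
--         while i < m and len(seen) != k:
--             seen.add(runs[i][0][0])
--             group += runs[i]
--             i += 1
--         groups.append(group)
--     return groups
-- ===== Notes on version B (the rewrite author's own statement) =====
-- stated objective: alternative
-- what changed: B is a two-pass algorithm: it first splits the data into maximal runs of equal first-elements, then greedily concatenates consecutive runs into a group until the group holds exactly k distinct first-elements; A is a single item-by-item pass that rebuilds the distinct set of the whole current group at every group boundary.
import Mathlib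
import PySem

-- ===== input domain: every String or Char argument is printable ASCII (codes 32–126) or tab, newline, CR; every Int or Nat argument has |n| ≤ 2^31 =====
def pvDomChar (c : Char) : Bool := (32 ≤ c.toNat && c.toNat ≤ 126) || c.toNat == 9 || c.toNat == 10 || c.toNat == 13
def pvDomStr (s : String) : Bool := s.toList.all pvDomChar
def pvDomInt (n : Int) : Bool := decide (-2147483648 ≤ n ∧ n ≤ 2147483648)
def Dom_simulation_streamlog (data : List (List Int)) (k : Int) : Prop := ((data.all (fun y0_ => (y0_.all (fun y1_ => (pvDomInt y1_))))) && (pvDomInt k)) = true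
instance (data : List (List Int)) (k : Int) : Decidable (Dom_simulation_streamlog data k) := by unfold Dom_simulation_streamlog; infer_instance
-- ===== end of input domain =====

-- B is a two-pass algorithm (split into maximal runs, then merge runs greedily until k distinct first-elements) instead of A's single pass with a per-boundary set rebuild; return-value equivalence proved on inputs whose items are nonempty (Pre_).


-- item[0]; total via getD 0 — Pre_ guarantees every item is nonempty, where this is exact
def pvHead0 (x : List Int) : Int := (PySem.List.pyGet? x 0).getD 0

-- ===== PORT A =====
-- loop body of A: state = (grouped_data, current_group, previous_num)
def pvStepA (k : Int) (st : List (List (List Int)) × List (List Int) × Option Int)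
    (item : List Int) : List (List (List Int)) × List (List Int) × Option Int :=
  let n := pvHead0 item
  if st.2.2 = some n ∨ st.2.1 = [] then
    (st.1, st.2.1 ++ [item], some n)
  else if (PySem.Set.len (PySem.Set.ofList (st.2.1.map pvHead0)) : Int) = k then
    (st.1 ++ [st.2.1], [item], some n)
  else
    (st.1, st.2.1 ++ [item], some n)

def simulation_streamlog (data : List (List Int)) (k : Int) : List (List (List Int)) :=
  let st := data.foldl (pvStepA k) ([], [], none)
  if st.2.1 ≠ [] then st.1 ++ [st.2.1] else st.1

-- ===== PORT B =====
-- run[0][0]: the common first-element of a run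
def pvRunVal (r : List (List Int)) : Int := pvHead0 (r.headD [])

-- B pass 1: the outer while over i; the inner while "advance j while data[j][0] == data[i][0]"
-- and the slice data[i:j] are the takeWhile, the tail data[j:] the dropWhile
def pvRuns : List (List Int) → List (List (List Int))
  | [] => []
  | x :: xs =>
    (x :: xs.takeWhile (fun y => pvHead0 y == pvHead0 x)) ::
      pvRuns (xs.dropWhile (fun y => pvHead0 y == pvHead0 x))
termination_by l => l.length
decreasing_by
  simp only [List.length_cons]
  exact Nat.lt_succ_of_le (List.length_dropWhile_le _ _)

-- B pass 2: the outer while (one step per group) fused with the inner while (one step per run)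
def pvChunk (k : Int) (seen : PySem.Set Int) (group : List (List Int)) :
    List (List (List Int)) → List (List (List Int))
  | [] => [group]
  | r :: rs =>
    if (PySem.Set.len seen : Int) = k then
      group :: pvChunk k (PySem.Set.ofList [pvRunVal r]) r rs
    else
      pvChunk k (PySem.Set.add seen (pvRunVal r)) (group ++ r) rs

def simulation_streamlog_alt (data : List (List Int)) (k : Int) : List (List (List Int)) :=
  match pvRuns data with
  | [] => []
  | r :: rs => pvChunk k (PySem.Set.ofList [pvRunVal r]) r rs

-- ===== PRECONDITION & SPEC =====
-- Pre_ excludes exactly the inputs on which Python A raises IndexError (item[0] on an empty item).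
def Pre_simulation_streamlog (data : List (List Int)) (k : Int) : Prop := ∀ item ∈ data, item ≠ []
instance (data : List (List Int)) (k : Int) : Decidable (Pre_simulation_streamlog data k) := by unfold Pre_simulation_streamlog; infer_instance
def pvWitness_simulation_streamlog : List (List Int) × Int := ([[1, 5], [1], [2], [3]], 2)

def Spec_simulation_streamlog (data : List (List Int)) (k : Int) (out : List (List (List Int))) : Prop := out = simulation_streamlog_alt data k
instance (data : List (List Int)) (k : Int) (out : List (List (List Int))) : Decidable (Spec_simulation_streamlog data k out) := by unfold Spec_simulation_streamlog; infer_instance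

-- ===== CLAIM (what is proved, stated in full; the proofs are below) =====
def Claim_equal_simulation_streamlog : Prop := ∀ (data : List (List Int)) (k : Int), Dom_simulation_streamlog data k → Pre_simulation_streamlog data k → Spec_simulation_streamlog data k (simulation_streamlog data k)

-- ===== LEMMAS AND PROOFS =====

-- set(l ++ [x]) = set(l).add(x)
theorem pv_ofList_append (l : List Int) (x : Int) :
    PySem.Set.ofList (l ++ [x]) = PySem.Set.add (PySem.Set.ofList l) x := by
  simp [PySem.Set.ofList_eq_foldl]

-- adding an element already present leaves the set unchanged
theorem pv_add_mem (s : PySem.Set Int) (x : Int) (h : x ∈ s) :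
    PySem.Set.add s x = s := by
  simp [PySem.Set.add, h]

-- A's fold absorbs a whole run whose value matches previous_num: every item is appended
theorem pv_fold_run (k : Int) (v : Int) :
    ∀ (l : List (List Int)), (∀ y ∈ l, pvHead0 y = v) →
    ∀ (g : List (List (List Int))) (cur : List (List Int)),
      l.foldl (pvStepA k) (g, cur, some v) = (g, cur ++ l, some v) := by
  intro l
  induction l with
  | nil => intro _ g cur; simp
  | cons y ys ih =>
    intro h g cur
    have hy : pvHead0 y = v := h y (List.mem_cons_self)
    simp only [List.foldl_cons]
    have : pvStepA k (g, cur, some v) y = (g, cur ++ [y], some v) := by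
      simp [pvStepA, hy]
    rw [this, ih (fun z hz => h z (List.mem_cons_of_mem _ hz))]
    simp

-- the set of firsts of a group extended by a constant-value run is the old set plus that value
theorem pv_seen_run (v : Int) :
    ∀ (l : List (List Int)), (∀ y ∈ l, pvHead0 y = v) → l ≠ [] →
    ∀ (cur : List (List Int)),
      PySem.Set.ofList ((cur ++ l).map pvHead0)
        = PySem.Set.add (PySem.Set.ofList (cur.map pvHead0)) v := by
  intro l
  induction l with
  | nil => intro _ h _; exact absurd rfl h
  | cons y ys ih =>
    intro h _ cur
    have hy : pvHead0 y = v := h y (List.mem_cons_self)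
    by_cases hys : ys = []
    · subst hys
      simp [hy, pv_ofList_append]
    · have : cur ++ y :: ys = (cur ++ [y]) ++ ys := by simp
      rw [this, ih (fun z hz => h z (List.mem_cons_of_mem _ hz)) hys (cur ++ [y])]
      have hv : v ∈ PySem.Set.add (PySem.Set.ofList (cur.map pvHead0)) v := by
        simp [PySem.Set.add]
        split <;> simp_all [PySem.Set.contains]
      rw [List.map_append, List.map_singleton, hy, pv_ofList_append, pv_add_mem _ _ hv]

-- finishing A's fold: add the last group if nonempty
def pvFin (st : List (List (List Int)) × List (List Int) × Option Int) : List (List (List Int)) :=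
  if st.2.1 ≠ [] then st.1 ++ [st.2.1] else st.1

-- main correspondence, at a run boundary: the hypotheses say the state is at the start of a
-- maximal run (rest's first value differs from previous_num) and seen is the set of firsts of cur
theorem pv_main (k : Int) :
    ∀ (n : Nat) (rest : List (List Int)), rest.length ≤ n →
    ∀ (g : List (List (List Int))) (cur : List (List Int)) (v : Int),
      cur ≠ [] →
      (∀ y, rest.head? = some y → pvHead0 y ≠ v) →
      pvFin (rest.foldl (pvStepA k) (g, cur, some v))
        = g ++ pvChunk k (PySem.Set.ofList (cur.map pvHead0)) cur (pvRuns rest) := by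
  intro n
  induction n with
  | zero =>
    intro rest hlen g cur v hcur _
    have : rest = [] := List.eq_nil_of_length_eq_zero (Nat.le_zero.mp hlen)
    subst this
    simp [pvFin, pvRuns, pvChunk, hcur]
  | succ m ih =>
    intro rest hlen g cur v hcur hbd
    match rest with
    | [] => simp [pvFin, pvRuns, pvChunk, hcur]
    | x :: xs =>
      have hw : pvHead0 x ≠ v := hbd x rfl
      have hsplit : xs = xs.takeWhile (fun y => pvHead0 y == pvHead0 x)
          ++ xs.dropWhile (fun y => pvHead0 y == pvHead0 x) :=
        (List.takeWhile_append_dropWhile).symm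
      have hsamev : ∀ y ∈ xs.takeWhile (fun y => pvHead0 y == pvHead0 x), pvHead0 y = pvHead0 x := by
        intro y hy
        have := List.mem_takeWhile_imp hy
        simpa using this
      have hrunv : ∀ y ∈ x :: xs.takeWhile (fun y => pvHead0 y == pvHead0 x), pvHead0 y = pvHead0 x := by
        intro y hy
        rcases List.mem_cons.mp hy with h | h
        · rw [h]
        · exact hsamev y h
      have hbd' : ∀ y, (xs.dropWhile (fun y => pvHead0 y == pvHead0 x)).head? = some y →
          pvHead0 y ≠ pvHead0 x := by
        intro y hy
        have := List.head?_dropWhile_not (fun y => pvHead0 y == pvHead0 x) xs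
        rw [hy] at this
        simpa using this
      have hlen' : (xs.dropWhile (fun y => pvHead0 y == pvHead0 x)).length ≤ m := by
        have h1 := List.length_dropWhile_le (fun y => pvHead0 y == pvHead0 x) xs
        have h2 : xs.length + 1 ≤ m + 1 := by simpa using hlen
        omega
      have hruns : pvRuns (x :: xs)
          = (x :: xs.takeWhile (fun y => pvHead0 y == pvHead0 x))
            :: pvRuns (xs.dropWhile (fun y => pvHead0 y == pvHead0 x)) := by
        rw [pvRuns]
      have hnotor : ¬ (some v = some (pvHead0 x) ∨ cur = []) := by
        rintro (h | h)
        · exact hw (Option.some.inj h).symm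
        · exact hcur h
      have hseen1 : PySem.Set.ofList ((x :: xs.takeWhile (fun y => pvHead0 y == pvHead0 x)).map pvHead0)
          = PySem.Set.ofList [pvRunVal (x :: xs.takeWhile (fun y => pvHead0 y == pvHead0 x))] := by
        have h0 : (x :: xs.takeWhile (fun y => pvHead0 y == pvHead0 x))
            = [] ++ (x :: xs.takeWhile (fun y => pvHead0 y == pvHead0 x)) := rfl
        rw [h0, pv_seen_run (pvHead0 x) _ hrunv (by simp) []]
        simp [PySem.Set.ofList_eq_foldl, pvRunVal]
      by_cases hk : ((PySem.Set.len (PySem.Set.ofList (cur.map pvHead0))) : Int) = k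
      · -- group boundary: A flushes cur and starts the new group with x
        have hx : pvStepA k (g, cur, some v) x = (g ++ [cur], [x], some (pvHead0 x)) := by
          simp only [pvStepA]
          rw [if_neg hnotor, if_pos hk]
        have hfold : (x :: xs).foldl (pvStepA k) (g, cur, some v)
            = (xs.dropWhile (fun y => pvHead0 y == pvHead0 x)).foldl (pvStepA k)
                (g ++ [cur], x :: xs.takeWhile (fun y => pvHead0 y == pvHead0 x), some (pvHead0 x)) := by
          conv_lhs => rw [List.foldl_cons, hx, hsplit, List.foldl_append,
              pv_fold_run k (pvHead0 x) _ hsamev]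
          rfl
        rw [hfold, ih _ hlen' (g ++ [cur]) _ (pvHead0 x) (by simp) hbd', hruns, hseen1,
            pvChunk, if_pos hk]
        simp
      · -- no boundary: A appends x (and the rest of its run) to cur
        have hx : pvStepA k (g, cur, some v) x = (g, cur ++ [x], some (pvHead0 x)) := by
          simp only [pvStepA]
          rw [if_neg hnotor, if_neg hk]
        have hfold : (x :: xs).foldl (pvStepA k) (g, cur, some v)
            = (xs.dropWhile (fun y => pvHead0 y == pvHead0 x)).foldl (pvStepA k)
                (g, cur ++ (x :: xs.takeWhile (fun y => pvHead0 y == pvHead0 x)), some (pvHead0 x)) := by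
          conv_lhs => rw [List.foldl_cons, hx, hsplit, List.foldl_append,
              pv_fold_run k (pvHead0 x) _ hsamev]
          rw [List.append_assoc]
          rfl
        have hseen2 : PySem.Set.ofList ((cur ++ (x :: xs.takeWhile (fun y => pvHead0 y == pvHead0 x))).map pvHead0)
            = PySem.Set.add (PySem.Set.ofList (cur.map pvHead0))
                (pvRunVal (x :: xs.takeWhile (fun y => pvHead0 y == pvHead0 x))) := by
          rw [pv_seen_run (pvHead0 x) _ hrunv (by simp) cur]
          rfl
        rw [hfold, ih _ hlen' g _ (pvHead0 x) (by simp) hbd', hruns, hseen2,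
            pvChunk, if_neg hk]

-- ===== VERDICT (by name: the statement is the Claim_ definition above) =====
theorem simulation_streamlog_spec : Claim_equal_simulation_streamlog := by
  intro data k _ _
  unfold Spec_simulation_streamlog simulation_streamlog simulation_streamlog_alt
  match data with
  | [] => simp [pvRuns]
  | x :: xs =>
    have hsplit : xs = xs.takeWhile (fun y => pvHead0 y == pvHead0 x)
        ++ xs.dropWhile (fun y => pvHead0 y == pvHead0 x) :=
      (List.takeWhile_append_dropWhile).symm
    have hsamev : ∀ y ∈ xs.takeWhile (fun y => pvHead0 y == pvHead0 x), pvHead0 y = pvHead0 x := by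
      intro y hy
      have := List.mem_takeWhile_imp hy
      simpa using this
    have hrunv : ∀ y ∈ x :: xs.takeWhile (fun y => pvHead0 y == pvHead0 x), pvHead0 y = pvHead0 x := by
      intro y hy
      rcases List.mem_cons.mp hy with h | h
      · rw [h]
      · exact hsamev y h
    have hbd' : ∀ y, (xs.dropWhile (fun y => pvHead0 y == pvHead0 x)).head? = some y →
        pvHead0 y ≠ pvHead0 x := by
      intro y hy
      have := List.head?_dropWhile_not (fun y => pvHead0 y == pvHead0 x) xs
      rw [hy] at this
      simpa using this
    have hx : pvStepA k ([], [], none) x = ([], [x], some (pvHead0 x)) := by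
      simp [pvStepA]
    have hfold : (x :: xs).foldl (pvStepA k) ([], [], none)
        = (xs.dropWhile (fun y => pvHead0 y == pvHead0 x)).foldl (pvStepA k)
            ([], x :: xs.takeWhile (fun y => pvHead0 y == pvHead0 x), some (pvHead0 x)) := by
      conv_lhs => rw [List.foldl_cons, hx, hsplit, List.foldl_append,
          pv_fold_run k (pvHead0 x) _ hsamev]
      rfl
    have hseen1 : PySem.Set.ofList ((x :: xs.takeWhile (fun y => pvHead0 y == pvHead0 x)).map pvHead0)
        = PySem.Set.ofList [pvRunVal (x :: xs.takeWhile (fun y => pvHead0 y == pvHead0 x))] := by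
      have h0 : (x :: xs.takeWhile (fun y => pvHead0 y == pvHead0 x))
          = [] ++ (x :: xs.takeWhile (fun y => pvHead0 y == pvHead0 x)) := rfl
      rw [h0, pv_seen_run (pvHead0 x) _ hrunv (by simp) []]
      simp [PySem.Set.ofList_eq_foldl, pvRunVal]
    show pvFin ((x :: xs).foldl (pvStepA k) ([], [], none)) = _
    rw [hfold, pv_main k _ _ le_rfl [] _ (pvHead0 x) (by simp) hbd', hseen1, pvRuns]
    exact List.nil_append _
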